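-- pv_equiv track=rewrite | github.com/asavoulides/Pokernow-HUD-New-CLI- | poker_now.py | parse_hands
-- ===== SOURCE A (Python) =====
-- def parse_hands(logs):
--     """Extract individual hands from logs."""
--     hands = []
--     in_hand = False
--     current_hand = []
--     for log in logs:
--         if log.startswith("-- ending"):
--             in_hand = False
--             if current_hand:
--                 hands.append(current_hand)
--             current_hand = []
--         if in_hand:
--             current_hand.append(log)
--         if log.startswith("-- starting"):
--             in_hand = True
--     return hands
-- ===== SOURCE B (Python) =====
-- def parse_hands(logs):
--     """Extract individual hands from logs."""
--     hands = []
--     i = 0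
--     n = len(logs)
--     while i < n:
--         if logs[i].startswith("-- starting"):
--             block = []
--             j = i + 1
--             while j < n and not logs[j].startswith("-- ending"):
--                 block.append(logs[j])
--                 j += 1
--             if j == n:
--                 break  # unterminated final hand is dropped
--             if block:
--                 hands.append(block)
--             i = j + 1
--         else:
--             i += 1
--     return hands
-- ===== Notes on version B (the rewrite author's own statement) =====
-- stated objective: alternative
-- what changed: Replaced the flag/accumulator single pass (in_hand boolean with per-line state updates) by an explicit index-driven two-level scan: an outer loop finds each '-- starting' line and an inner loop collects lines up to the matching '-- ending', dropping an unterminated final block.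
import Mathlib
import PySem

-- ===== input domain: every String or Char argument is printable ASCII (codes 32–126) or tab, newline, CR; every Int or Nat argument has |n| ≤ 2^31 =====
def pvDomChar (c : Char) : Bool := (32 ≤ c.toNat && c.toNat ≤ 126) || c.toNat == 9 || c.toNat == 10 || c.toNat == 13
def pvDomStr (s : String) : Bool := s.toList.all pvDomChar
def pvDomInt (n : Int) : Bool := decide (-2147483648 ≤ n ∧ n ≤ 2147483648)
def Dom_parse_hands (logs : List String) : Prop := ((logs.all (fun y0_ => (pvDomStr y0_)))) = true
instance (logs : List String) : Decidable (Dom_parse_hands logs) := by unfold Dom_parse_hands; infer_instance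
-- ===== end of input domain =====

-- B replaces A's in_hand-flag single pass by an explicit index/nested-scan decomposition; same cost, proved equal on all inputs.

-- ===== PORT A =====
-- state = (hands, in_hand, current_hand); one step per log line, transliterating A's three sequential ifs
def parse_hands_step (st : List (List String) × Bool × List String) (log : String) :
    List (List String) × Bool × List String :=
  let st1 :=
    if PySem.Str.startswith log "-- ending" then
      ((if st.2.2.isEmpty then st.1 else st.1 ++ [st.2.2]), false, ([] : List String))
    else st
  let st2 := if st1.2.1 then (st1.1, st1.2.1, st1.2.2 ++ [log]) else st1
  if PySem.Str.startswith log "-- starting" then (st2.1, true, st2.2.2) else st2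

def parse_hands (logs : List String) : List (List String) :=
  (logs.foldl parse_hands_step ([], false, [])).1

-- ===== PORT B =====
-- inner while loop of Source B: collect lines until the first '-- ending'; none = ran off the end
def pvSplitAtEnding : List String → Option (List String × List String)
  | [] => none
  | l :: ls =>
    if PySem.Str.startswith l "-- ending" then some ([], ls)
    else
      match pvSplitAtEnding ls with
      | some (b, r) => some (l :: b, r)
      | none => none

theorem pvSplitAtEnding_length : ∀ (ls b r : List String), pvSplitAtEnding ls = some (b, r) → r.length < ls.length := by
  intro ls
  induction ls with
  | nil => intro b r h; simp [pvSplitAtEnding] at h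
  | cons l ls ih =>
    intro b r h
    simp only [pvSplitAtEnding] at h
    split at h
    · cases h; simp
    · cases hrec : pvSplitAtEnding ls with
      | none => rw [hrec] at h; cases h
      | some p =>
        rw [hrec] at h
        cases h
        exact Nat.lt_succ_of_lt (ih p.1 p.2 hrec)

-- outer while loop of Source B
def parse_hands_alt : List String → List (List String)
  | [] => []
  | l :: ls =>
    if PySem.Str.startswith l "-- starting" then
      match h : pvSplitAtEnding ls with
      | some (b, r) => (if b.isEmpty then [] else [b]) ++ parse_hands_alt r
      | none => []
    else parse_hands_alt ls
termination_by ls => ls.length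
decreasing_by
  · exact Nat.lt_succ_of_lt (pvSplitAtEnding_length _ _ _ h)
  · simp

-- ===== PRECONDITION & SPEC =====
def Spec_parse_hands (logs : List String) (out : List (List String)) : Prop := out = parse_hands_alt logs
instance (logs : List String) (out : List (List String)) : Decidable (Spec_parse_hands logs out) := by unfold Spec_parse_hands; infer_instance

-- ===== CLAIM (what is proved, stated in full; the proofs are below) =====
def Claim_equal_parse_hands : Prop := ∀ (logs : List String), Dom_parse_hands logs → Spec_parse_hands logs (parse_hands logs)

-- ===== LEMMAS AND PROOFS =====

-- a line cannot start with both markers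
theorem pv_ending_not_starting (l : String) (h : PySem.Str.startswith l "-- ending" = true) :
    PySem.Str.startswith l "-- starting" = false := by
  by_contra hs
  rw [Bool.not_eq_false] at hs
  rw [PySem.Str.startswith_eq, PySem.Chars.startswith_iff] at h hs
  rcases List.prefix_or_prefix_of_prefix h hs with hp | hp
  · exact absurd hp (by decide)
  · exact absurd hp (by decide)

-- one-step lemmas for A's transition function
theorem pv_step_end (hands : List (List String)) (b : Bool) (cur : List String) (l : String)
    (he : PySem.Str.startswith l "-- ending" = true) :
    parse_hands_step (hands, b, cur) l = ((if cur.isEmpty then hands else hands ++ [cur]), false, []) := by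
  have hs := pv_ending_not_starting l he
  simp at he hs
  simp [parse_hands_step, he, hs]

theorem pv_step_false_start (hands : List (List String)) (cur : List String) (l : String)
    (he : PySem.Str.startswith l "-- ending" = false)
    (hst : PySem.Str.startswith l "-- starting" = true) :
    parse_hands_step (hands, false, cur) l = (hands, true, cur) := by
  simp at he hst
  simp [parse_hands_step, he, hst]

theorem pv_step_false_skip (hands : List (List String)) (cur : List String) (l : String)
    (he : PySem.Str.startswith l "-- ending" = false)
    (hst : PySem.Str.startswith l "-- starting" = false) :
    parse_hands_step (hands, false, cur) l = (hands, false, cur) := by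
  simp at he hst
  simp [parse_hands_step, he, hst]

theorem pv_step_true_noend (hands : List (List String)) (cur : List String) (l : String)
    (he : PySem.Str.startswith l "-- ending" = false) :
    parse_hands_step (hands, true, cur) l = (hands, true, cur ++ [l]) := by
  simp at he
  simp [parse_hands_step, he]

-- equation lemmas for parse_hands_alt (its match names its proof, so we unfold via `split`)
theorem pv_alt_not_starting (l : String) (ls : List String)
    (hst : PySem.Str.startswith l "-- starting" = false) :
    parse_hands_alt (l :: ls) = parse_hands_alt ls := by
  rw [parse_hands_alt, if_neg (by simpa using hst)]

theorem pv_alt_some (l : String) (ls b r : List String)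
    (hst : PySem.Str.startswith l "-- starting" = true)
    (h : pvSplitAtEnding ls = some (b, r)) :
    parse_hands_alt (l :: ls) = (if b.isEmpty then [] else [b]) ++ parse_hands_alt r := by
  rw [parse_hands_alt, if_pos hst]
  split
  · rename_i b' r' h'
    rw [h] at h'
    cases h'
    rfl
  · rename_i h'
    rw [h] at h'
    cases h'

theorem pv_alt_none (l : String) (ls : List String)
    (hst : PySem.Str.startswith l "-- starting" = true)
    (h : pvSplitAtEnding ls = none) :
    parse_hands_alt (l :: ls) = [] := by
  rw [parse_hands_alt, if_pos hst]
  split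
  · rename_i b' r' h'
    rw [h] at h'
    cases h'
  · rfl

-- unfolding pvSplitAtEnding one step
theorem pv_split_cons_end (l : String) (ls : List String)
    (he : PySem.Str.startswith l "-- ending" = true) :
    pvSplitAtEnding (l :: ls) = some ([], ls) := by
  rw [pvSplitAtEnding, if_pos he]

theorem pv_split_cons_noend (l : String) (ls : List String)
    (he : PySem.Str.startswith l "-- ending" = false) :
    pvSplitAtEnding (l :: ls) =
      (match pvSplitAtEnding ls with
       | some (b, r) => some (l :: b, r)
       | none => none) := by
  rw [pvSplitAtEnding, if_neg (by simpa using he)]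

-- the two loop invariants of A's fold, by one mutual induction on the remaining logs
theorem pv_loop_both (ls : List String) :
    (∀ hands, (ls.foldl parse_hands_step (hands, false, [])).1 = hands ++ parse_hands_alt ls) ∧
    (∀ hands cur, (ls.foldl parse_hands_step (hands, true, cur)).1 =
      hands ++ (match pvSplitAtEnding ls with
        | some (b, r) => (if (cur ++ b).isEmpty then [] else [cur ++ b]) ++ parse_hands_alt r
        | none => [])) := by
  induction ls with
  | nil => exact ⟨fun hands => by simp [parse_hands_alt], fun hands cur => by simp [pvSplitAtEnding]⟩
  | cons l ls ih =>
    constructor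
    · intro hands
      cases he : PySem.Str.startswith l "-- ending" with
      | true =>
        rw [List.foldl_cons, pv_step_end hands false [] l he,
          pv_alt_not_starting l ls (pv_ending_not_starting l he)]
        simpa using ih.1 hands
      | false =>
        cases hst : PySem.Str.startswith l "-- starting" with
        | true =>
          rw [List.foldl_cons, pv_step_false_start hands [] l he hst, ih.2 hands []]
          cases hrec : pvSplitAtEnding ls with
          | some p =>
            rw [pv_alt_some l ls p.1 p.2 hst (by rw [hrec])]
            simp
          | none =>
            rw [pv_alt_none l ls hst hrec]
        | false =>
          rw [List.foldl_cons, pv_step_false_skip hands [] l he hst,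
            pv_alt_not_starting l ls hst]
          exact ih.1 hands
    · intro hands cur
      cases he : PySem.Str.startswith l "-- ending" with
      | true =>
        rw [List.foldl_cons, pv_step_end hands true cur l he, ih.1, pv_split_cons_end l ls he]
        cases hc : cur.isEmpty <;> simp_all
      | false =>
        rw [List.foldl_cons, pv_step_true_noend hands cur l he, ih.2, pv_split_cons_noend l ls he]
        cases hrec : pvSplitAtEnding ls with
        | some p => simp
        | none => simp

-- ===== VERDICT (by name: the statement is the Claim_ definition above) =====
theorem parse_hands_spec : Claim_equal_parse_hands := by
  intro logs _
  unfold Spec_parse_hands parse_hands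
  simpa using (pv_loop_both logs).1 []
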